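-- pv_equiv track=rewrite | github.com/nyongja/Programmers | KAKAO/2021 KAKAO BUILD RECRUITMENT/07_minimize_sales_decline.py | solution
-- ===== SOURCE A (Python) =====
-- def dfs(sales, graph, count, v):
--     # 현재 노드를 방문 처리
--     if len(graph[v]) == 0 : # 리프노드면
--         count[v][1] = sales[v-1]
--         count[v][0] = 0
--     elif len(graph[v]) != 0 : # 리프노드가 아니면 서브트리 방문
--         sum_child = 0
--         min_child = []
--         check = False
--         for i in graph[v]:
--             count, min_v = dfs(sales, graph, count, i)
--             sum_child += min_v
--             min_child.append(count[i][1] - count[i][0])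
--             if count[i][0] > count[i][1] :
--               check = True
--         count[v][1] = sales[v-1] + sum_child
--         if check:
--             count[v][0] = sum_child
--         else :
--             count[v][0] = sum_child + min(min_child)
--     min_v = min(count[v][1], count[v][0])
--     return count, min_v
--
-- def solution(sales, links):
--     answer = 0
--     graph = [[] for _ in range(len(sales) + 1)]
--     for link in links :
--       graph[link[0]].append(link[1])
--
--     count = [[0, 0] for _ in range(len(sales) +1)]
--     count, _ = dfs(sales, graph, count, 1)
--     answer = min(count[1][0], count[1][1])
--     return answer
-- ===== SOURCE B (Python) =====
-- def solution(sales, links):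
--     n = len(sales)
--     children = [[] for _ in range(n + 1)]
--     for link in links:
--         children[link[0]].append(link[1])
--     # bottom-up value iteration: keep[v]/skip[v] converge to the tree-DP
--     # values (keep = v included, skip = v excluded) after height(v) rounds
--     keep = [0] * (n + 1)
--     skip = [0] * (n + 1)
--     for _ in range(n):
--         nkeep = [0]
--         nskip = [0]
--         for v in range(1, n + 1):
--             cs = children[v]
--             if cs:
--                 base = sum(min(keep[c], skip[c]) for c in cs)
--                 nkeep.append(sales[v - 1] + base)
--                 if any(skip[c] > keep[c] for c in cs):
--                     nskip.append(base)
--                 else: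
--                     nskip.append(base + min(keep[c] - skip[c] for c in cs))
--             else:
--                 nkeep.append(sales[v - 1])
--                 nskip.append(0)
--         if nkeep == keep and nskip == skip:
--             break
--         keep, skip = nkeep, nskip
--     return min(skip[1], keep[1])
-- ===== Notes on version B (the rewrite author's own statement) =====
-- stated objective: alternative
-- what changed: The recursive dfs with an in-place count table is replaced by an iterative synchronous bottom-up value iteration: keep[]/skip[] arrays are recomputed in rounds over all nodes (at most n rounds, early exit once stable), so the recursion and the mutated count list disappear.
-- outside the precondition, e.g. on solution([5, -3], [[1, 0]]): A returns -3, B returns 0; on solution([1, 2], [[2, 9]]): A returns 0, B raises IndexError; on solution([1, 2, 3], [[1, 2], [1, 3], [2, 3]]): A returns 2, B returns 2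
import Mathlib
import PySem

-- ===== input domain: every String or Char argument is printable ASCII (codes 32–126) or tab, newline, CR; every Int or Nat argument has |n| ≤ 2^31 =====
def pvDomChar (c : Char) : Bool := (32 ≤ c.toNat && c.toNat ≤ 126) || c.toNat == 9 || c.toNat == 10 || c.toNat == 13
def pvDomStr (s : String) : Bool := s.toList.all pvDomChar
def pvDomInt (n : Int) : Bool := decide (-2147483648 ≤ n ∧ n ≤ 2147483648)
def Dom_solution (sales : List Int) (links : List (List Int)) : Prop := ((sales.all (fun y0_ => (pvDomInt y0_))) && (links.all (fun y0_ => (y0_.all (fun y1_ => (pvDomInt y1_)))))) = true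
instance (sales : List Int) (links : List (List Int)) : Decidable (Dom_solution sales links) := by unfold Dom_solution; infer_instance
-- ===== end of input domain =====

-- B replaces A's recursive dfs + mutated count table by an iterative bottom-up value
-- iteration over keep/skip arrays (same per-node formula); return values agree on Pre_.

-- ===== PORT A =====
-- shared helper: both Pythons build the child-adjacency list with the same loop
-- 'for link in links: graph[link[0]].append(link[1])' (pyGet?/pySet? = Python indexing)
def buildStep (g : Option (List (List Int))) (link : List Int) : Option (List (List Int)) :=
  match g with
  | none => none
  | some gr =>
    match PySem.List.pyGet? link 0 with
    | none => none
    | some a =>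
      match PySem.List.pyGet? gr a with
      | none => none
      | some row =>
        match PySem.List.pyGet? link 1 with
        | none => none
        | some b => PySem.List.pySet? gr a (row ++ [b])

def buildAdj (rows : Nat) (links : List (List Int)) : Option (List (List Int)) :=
  links.foldl buildStep (some (List.replicate rows ([] : List Int)))

-- count[v][j] = x  (read the cell pair at python index v, write it back modified)
def pyCellSet (count : List (Int × Int)) (v : Int) (f : Int × Int → Int × Int) :
    Option (List (Int × Int)) :=
  match PySem.List.pyGet? count v with
  | none => none
  | some p => PySem.List.pySet? count v (f p)

mutual
-- literal port of A's dfs (fuel = totality guard only; Python raises RecursionError on cycles)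
def dfsA (sales : List Int) (graph : List (List Int)) :
    Nat → List (Int × Int) → Int → Option (List (Int × Int) × Int)
  | 0, _, _ => none
  | fuel+1, count, v =>
    match PySem.List.pyGet? graph v with
    | none => none
    | some cs =>
      match (if cs.length = 0 then
          -- count[v][1] = sales[v-1]; count[v][0] = 0
          match PySem.List.pyGet? sales (v - 1) with
          | none => none
          | some s =>
            match pyCellSet count v (fun p => (p.1, s)) with
            | none => none
            | some c1 => pyCellSet c1 v (fun p => (0, p.2))
        else
          match dfsLoopA sales graph fuel cs count 0 [] false with
          | none => none
          | some (count', sumChild, minChild, check) =>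
            match PySem.List.pyGet? sales (v - 1) with
            | none => none
            | some s =>
              match pyCellSet count' v (fun p => (p.1, s + sumChild)) with
              | none => none
              | some c1 =>
                if check then pyCellSet c1 v (fun p => (sumChild, p.2))
                else
                  match PySem.List.min? minChild (fun x => x) with
                  | none => none  -- min([]) = ValueError (unreachable: cs ≠ [])
                  | some m => pyCellSet c1 v (fun p => (sumChild + m, p.2))) with
      | none => none
      | some count2 =>
        -- min_v = min(count[v][1], count[v][0])
        match PySem.List.pyGet? count2 v with
        | none => none
        | some p => some (count2, min p.2 p.1)
termination_by fuel _ _ => (fuel, 0, 0)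

-- A's 'for i in graph[v]' body, threading (count, sum_child, min_child, check)
def dfsLoopA (sales : List Int) (graph : List (List Int)) :
    Nat → List Int → List (Int × Int) → Int → List Int → Bool →
    Option (List (Int × Int) × Int × List Int × Bool)
  | _, [], count, sumChild, minChild, check => some (count, sumChild, minChild, check)
  | fuel, i :: rest, count, sumChild, minChild, check =>
    match dfsA sales graph fuel count i with
    | none => none
    | some (count', minV) =>
      match PySem.List.pyGet? count' i with
      | none => none
      | some p =>
        dfsLoopA sales graph fuel rest count' (sumChild + minV)
          (minChild ++ [p.2 - p.1]) (check || decide (p.1 > p.2))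
termination_by fuel cs _ _ _ _ => (fuel, 1, cs.length)
end

def solution (sales : List Int) (links : List (List Int)) : Int :=
  let n := sales.length
  match buildAdj (n+1) links with
  | none => 0
  | some graph =>
    match dfsA sales graph (n+1) (List.replicate (n+1) ((0 : Int), (0 : Int))) 1 with
    | none => 0
    | some (count, _) =>
      match PySem.List.pyGet? count 1 with
      | none => 0
      | some p => min p.1 p.2

-- ===== PORT B =====
-- base = sum(min(keep[c], skip[c]) for c in cs)
def sumMins (keep skip : List Int) : List Int → Int → Option Int
  | [], acc => some acc
  | c :: r, acc =>
    match PySem.List.pyGet? keep c with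
    | none => none
    | some k =>
      match PySem.List.pyGet? skip c with
      | none => none
      | some s => sumMins keep skip r (acc + min k s)

-- any(skip[c] > keep[c] for c in cs), short-circuiting like Python's any
def anyGT (keep skip : List Int) : List Int → Option Bool
  | [] => some false
  | c :: r =>
    match PySem.List.pyGet? skip c with
    | none => none
    | some s =>
      match PySem.List.pyGet? keep c with
      | none => none
      | some k => if s > k then some true else anyGT keep skip r

-- the values keep[c] - skip[c] consumed by min(...)
def diffsB (keep skip : List Int) : List Int → Option (List Int)
  | [] => some []
  | c :: r =>
    match PySem.List.pyGet? keep c with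
    | none => none
    | some k =>
      match PySem.List.pyGet? skip c with
      | none => none
      | some s =>
        match diffsB keep skip r with
        | none => none
        | some ds => some ((k - s) :: ds)

-- the body of B's inner loop 'for v in range(1, n+1)'
def passBody (sales : List Int) (children : List (List Int)) (keep skip : List Int)
    (acc : Option (List Int × List Int)) (v : Int) : Option (List Int × List Int) :=
  match acc with
  | none => none
  | some (nk, ns) =>
    match PySem.List.pyGet? children v with
    | none => none
    | some cs =>
      if cs ≠ [] then
        match sumMins keep skip cs 0 with
        | none => none
        | some base =>
          match PySem.List.pyGet? sales (v - 1) with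
          | none => none
          | some s =>
            match anyGT keep skip cs with
            | none => none
            | some b =>
              if b then some (nk ++ [s + base], ns ++ [base])
              else
                match diffsB keep skip cs with
                | none => none
                | some ds =>
                  match PySem.List.min? ds (fun x => x) with
                  | none => none
                  | some m => some (nk ++ [s + base], ns ++ [base + m])
      else
        match PySem.List.pyGet? sales (v - 1) with
        | none => none
        | some s => some (nk ++ [s], ns ++ [(0 : Int)])

-- one round: 'for v in range(1, n+1): ... nkeep.append(...); nskip.append(...)'
def passB (sales : List Int) (children : List (List Int)) (n : Nat)
    (keep skip : List Int) : Option (List Int × List Int) :=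
  (PySem.List.pyRange 1 ((n : Int) + 1) 1).foldl (passBody sales children keep skip)
    (some ([0], [0]))

-- 'for _ in range(n): ... if nkeep == keep and nskip == skip: break'
def roundsB (sales : List Int) (children : List (List Int)) (n : Nat) :
    Nat → List Int × List Int → Option (List Int × List Int)
  | 0, st => some st
  | k+1, (keep, skip) =>
    match passB sales children n keep skip with
    | none => none
    | some (nk, ns) =>
      if nk = keep ∧ ns = skip then some (keep, skip)
      else roundsB sales children n k (nk, ns)

def solution_alt (sales : List Int) (links : List (List Int)) : Int :=
  let n := sales.length
  match buildAdj (n+1) links with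
  | none => 0
  | some children =>
    match roundsB sales children n n (List.replicate (n+1) 0, List.replicate (n+1) 0) with
    | none => 0
    | some (keep, skip) =>
      match PySem.List.pyGet? skip 1 with
      | none => 0
      | some a =>
        match PySem.List.pyGet? keep 1 with
        | none => 0
        | some b => min a b

-- ===== PRECONDITION & SPEC =====
-- the row of graph that link l's supervisor entry denotes (Python index semantics)
def linkRow (n : Nat) (l : List Int) : Option Nat := PySem.List.pyIdx? (n + 1) (l.getD 0 0)

-- one closure round: add every subordinate of an already-reached employee
def reachPass (n : Nat) (links : List (List Int)) (S : List Int) : List Int :=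
  links.foldl (fun S l =>
    match linkRow n l with
    | some i => if (i : Int) ∈ S ∧ l.getD 1 0 ∉ S then S ++ [l.getD 1 0] else S
    | none => S) S

def reachL (n : Nat) (links : List (List Int)) : Nat → List Int → List Int
  | 0, S => S
  | f + 1, S =>
    if reachPass n links S = S then S else reachL n links f (reachPass n links S)

-- the employees reachable from the root 1 (closure stabilises within links.length rounds)
def reachSet (sales : List Int) (links : List (List Int)) : List Int :=
  reachL sales.length links (links.length + 1) [1]

-- Pre_ admits org charts whose part reachable from employee 1 is a valid tree (ids in 2..n,
-- one supervisor link per reached employee) and whose remaining, never-visited links still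
-- carry indexable entries; outside it A's recursion can cycle (RecursionError), or A returns
-- values that depend on negative-index wraparound or on re-running shared subtrees.
def Pre_solution (sales : List Int) (links : List (List Int)) : Prop :=
  sales ≠ [] ∧
  (∀ l ∈ links, 2 ≤ l.length ∧ (linkRow sales.length l).isSome ∧
    (1 ≤ (linkRow sales.length l).getD 0 → (linkRow sales.length l).getD 0 ≤ sales.length →
      -((sales.length : Int) + 1) ≤ l.getD 1 0 ∧ l.getD 1 0 ≤ (sales.length : Int))) ∧
  reachPass sales.length links (reachSet sales links) = reachSet sales links ∧
  (∀ l ∈ links, ((linkRow sales.length l).getD 0 : Int) ∈ reachSet sales links →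
    2 ≤ l.getD 1 0 ∧ l.getD 1 0 ≤ (sales.length : Int)) ∧
  (links.filterMap (fun l =>
    match linkRow sales.length l with
    | some i => if (i : Int) ∈ reachSet sales links then some (i, l.getD 1 0) else none
    | none => none)).Pairwise (fun a b => a.2 = b.2 → a.1 = b.1)
instance (sales : List Int) (links : List (List Int)) : Decidable (Pre_solution sales links) := by
  unfold Pre_solution; infer_instance

def pvWitness_solution : List Int × List (List Int) := ([3, 2, 4], [[1, 2], [2, 3]])

def Spec_solution (sales : List Int) (links : List (List Int)) (out : Int) : Prop :=
  out = solution_alt sales links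
instance (sales : List Int) (links : List (List Int)) (out : Int) :
    Decidable (Spec_solution sales links out) := by unfold Spec_solution; infer_instance

-- ===== CLAIM (what is proved, stated in full; the proofs are below) =====
def Claim_equal_solution : Prop := ∀ (sales : List Int) (links : List (List Int)),
  Dom_solution sales links → Pre_solution sales links →
  Spec_solution sales links (solution sales links)

-- ===== LEMMAS AND PROOFS =====

-- pure fuel-indexed spec of the per-node DP pair (skip-value, keep-value)
mutual
def Fspec (sales : List Int) (children : List (List Int)) : Nat → Int → Option (Int × Int)
  | 0, _ => none
  | k+1, v =>
    match PySem.List.pyGet? children v with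
    | none => none
    | some cs =>
      if cs.length = 0 then
        match PySem.List.pyGet? sales (v - 1) with
        | none => none
        | some s => some (0, s)
      else
        match Flspec sales children k cs 0 [] false with
        | none => none
        | some (s, ml, ch) =>
          match PySem.List.pyGet? sales (v - 1) with
          | none => none
          | some sl =>
            if ch then some (s, sl + s)
            else
              match PySem.List.min? ml (fun x => x) with
              | none => none
              | some m => some (s + m, sl + s)
termination_by k v => (k, 0, 0)

def Flspec (sales : List Int) (children : List (List Int)) :
    Nat → List Int → Int → List Int → Bool → Option (Int × List Int × Bool)
  | _, [], s, ml, ch => some (s, ml, ch)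
  | k, c :: r, s, ml, ch =>
    match Fspec sales children k c with
    | none => none
    | some p =>
      Flspec sales children k r (s + min p.2 p.1) (ml ++ [p.2 - p.1]) (ch || decide (p.1 > p.2))
termination_by k cs _ _ _ => (k, 1, cs.length)
end

-- proof-side context: what Pre_ gives about the built adjacency and the reach set R
def TCtx (sales : List Int) (children : List (List Int)) (R : List Int) (n : Nat) : Prop :=
  sales.length = n ∧ 1 ≤ n ∧ children.length = n + 1 ∧ (1 : Int) ∈ R ∧
  (∀ (v : Int) (cs : List Int), 1 ≤ v → v ≤ (n : Int) →
      PySem.List.pyGet? children v = some cs →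
      ∀ c ∈ cs, -((n : Int) + 1) ≤ c ∧ c ≤ (n : Int)) ∧
  (∀ v ∈ R, 1 ≤ v ∧ v ≤ (n : Int)) ∧
  (∀ v ∈ R, ∀ (cs : List Int), PySem.List.pyGet? children v = some cs →
      ∀ c ∈ cs, c ∈ R ∧ 2 ≤ c ∧ c ≤ (n : Int)) ∧
  (∀ (v w : Int), v ∈ R → w ∈ R → ∀ (cs cs' : List Int) (c : Int),
      PySem.List.pyGet? children v = some cs → PySem.List.pyGet? children w = some cs' →
      c ∈ cs → c ∈ cs' → v = w)

-- ---- python-index helpers ----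
theorem idx_lt {α : Type} (xs : List α) (v : Int) (k : Nat)
    (h : PySem.List.pyIdx? xs.length v = some k) : k < xs.length := by
  unfold PySem.List.pyIdx? at h
  split_ifs at h <;> simp_all <;> omega

theorem get_of_idx {α : Type} (xs : List α) (v : Int) (k : Nat)
    (h : PySem.List.pyIdx? xs.length v = some k) : PySem.List.pyGet? xs v = xs[k]? := by
  unfold PySem.List.pyGet?
  rw [h]; rfl

theorem idx_of_get {α : Type} (xs : List α) (v : Int) (x : α)
    (h : PySem.List.pyGet? xs v = some x) : ∃ k, PySem.List.pyIdx? xs.length v = some k := by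
  unfold PySem.List.pyGet? at h
  cases hk : PySem.List.pyIdx? xs.length v with
  | none => rw [hk] at h; simp at h
  | some k => exact ⟨k, rfl⟩

theorem idx_congr {α β : Type} (xs : List α) (ys : List β) (v : Int)
    (h : xs.length = ys.length) :
    PySem.List.pyIdx? ys.length v = PySem.List.pyIdx? xs.length v := by rw [h]

theorem set_of_idx {α : Type} (xs : List α) (v : Int) (x : α) (k : Nat)
    (h : PySem.List.pyIdx? xs.length v = some k) :
    PySem.List.pySet? xs v x = some (xs.set k x) := by
  unfold PySem.List.pySet?
  rw [h]; rfl

theorem get_set_self {α : Type} (xs : List α) (v : Int) (x : α) (k : Nat)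
    (h : PySem.List.pyIdx? xs.length v = some k) :
    PySem.List.pyGet? (xs.set k x) v = some x := by
  have hk := idx_lt xs v k h
  have h2 : PySem.List.pyIdx? (xs.set k x).length v = some k := by
    rw [List.length_set]; exact h
  rw [get_of_idx _ v k h2, List.getElem?_set_self (by simpa using hk)]

theorem idx_pos {α : Type} (xs : List α) (v : Int) (h0 : 0 ≤ v) (h1 : v < (xs.length : Int)) :
    PySem.List.pyIdx? xs.length v = some v.toNat := by
  unfold PySem.List.pyIdx?
  rw [if_pos h0, if_pos h1]

theorem cellSet_of_idx (count : List (Int × Int)) (v : Int) (f : Int × Int → Int × Int)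
    (k : Nat) (h : PySem.List.pyIdx? count.length v = some k) :
    pyCellSet count v f = some (count.set k (f (count.getD k (0, 0)))) := by
  have hk := idx_lt count v k h
  unfold pyCellSet
  rw [get_of_idx _ v k h, List.getElem?_eq_getElem hk]
  simp only [set_of_idx _ v _ k h, List.getD_eq_getElem _ _ hk]

-- ---- A's dfs computes Fspec ----
theorem dfsLoop_of_Fl (sales : List Int) (graph : List (List Int)) (fuel : Nat)
    (IH : ∀ (count : List (Int × Int)) (v : Int) (p : Int × Int),
      count.length = graph.length → Fspec sales graph fuel v = some p →
      ∃ count', dfsA sales graph fuel count v = some (count', min p.2 p.1) ∧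
        count'.length = graph.length ∧ PySem.List.pyGet? count' v = some p) :
    ∀ (cs : List Int) (count : List (Int × Int)) (s : Int) (ml : List Int) (ch : Bool)
      (out : Int × List Int × Bool),
      count.length = graph.length →
      Flspec sales graph fuel cs s ml ch = some out →
      ∃ count', dfsLoopA sales graph fuel cs count s ml ch = some (count', out) ∧
        count'.length = graph.length := by
  intro cs
  induction cs with
  | nil =>
    intro count s ml ch out hlen hfl
    rw [Flspec] at hfl
    obtain rfl : (s, ml, ch) = out := by simpa using hfl
    exact ⟨count, by rw [dfsLoopA], hlen⟩
  | cons c r ih =>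
    intro count s ml ch out hlen hfl
    rw [Flspec] at hfl
    cases hF : Fspec sales graph fuel c with
    | none => rw [hF] at hfl; simp at hfl
    | some p =>
      simp only [hF] at hfl
      obtain ⟨count1, hrun, hlen1, hread⟩ := IH count c p hlen hF
      obtain ⟨count', hrun', hlen'⟩ := ih count1 _ _ _ out hlen1 hfl
      refine ⟨count', ?_, hlen'⟩
      rw [dfsLoopA, hrun]
      simpa [hread] using hrun'

theorem dfsA_of_F (sales : List Int) (graph : List (List Int)) :
    ∀ (fuel : Nat) (count : List (Int × Int)) (v : Int) (p : Int × Int),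
      count.length = graph.length →
      Fspec sales graph fuel v = some p →
      ∃ count', dfsA sales graph fuel count v = some (count', min p.2 p.1) ∧
        count'.length = graph.length ∧ PySem.List.pyGet? count' v = some p := by
  intro fuel
  induction fuel with
  | zero => intro count v p _ hF; rw [Fspec] at hF; simp at hF
  | succ k ihf =>
    intro count v p hlen hF
    rw [Fspec] at hF
    cases hcs : PySem.List.pyGet? graph v with
    | none => rw [hcs] at hF; simp at hF
    | some cs =>
    simp only [hcs] at hF
    obtain ⟨ki, hki⟩ := idx_of_get _ _ _ hcs
    have hki1 : PySem.List.pyIdx? count.length v = some ki := by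
      rw [idx_congr graph count v hlen.symm]; exact hki
    by_cases hlf : cs.length = 0
    · simp only [if_pos hlf] at hF
      cases hsv : PySem.List.pyGet? sales (v - 1) with
      | none => rw [hsv] at hF; simp at hF
      | some sv =>
      simp only [hsv] at hF
      obtain rfl : ((0 : Int), sv) = p := by simpa using hF
      have hset1 := cellSet_of_idx count v (fun p => (p.1, sv)) ki hki1
      have hklt := idx_lt count v ki hki1
      set c1 := count.set ki ((count.getD ki (0, 0)).1, sv) with hc1
      have hki2 : PySem.List.pyIdx? c1.length v = some ki := by
        rw [hc1, List.length_set]; exact hki1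
      have hset2 := cellSet_of_idx c1 v (fun p => ((0 : Int), p.2)) ki hki2
      have hc1v : c1.getD ki (0, 0) = ((count.getD ki (0, 0)).1, sv) := by
        rw [hc1, List.getD_eq_getElem _ _ (by simpa using hklt), List.getElem_set_self (by simpa using hklt)]
      rw [hc1v] at hset2
      refine ⟨c1.set ki ((0 : Int), sv), ?_, by simp [hc1, hlen], ?_⟩
      · rw [dfsA, hcs]
        simp only [if_pos hlf, hsv, hset1, hset2,
          get_set_self c1 v ((0 : Int), sv) ki hki2]
      · exact get_set_self c1 v ((0 : Int), sv) ki hki2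
    · simp only [if_neg hlf] at hF
      cases hloop : Flspec sales graph k cs 0 [] false with
      | none => rw [hloop] at hF; simp at hF
      | some out =>
      obtain ⟨S, ML, CH⟩ := out
      simp only [hloop] at hF
      cases hsv : PySem.List.pyGet? sales (v - 1) with
      | none => rw [hsv] at hF; simp at hF
      | some sv =>
      simp only [hsv] at hF
      obtain ⟨count1, hrunL, hlen1⟩ :=
        dfsLoop_of_Fl sales graph k ihf cs count 0 [] false (S, ML, CH) hlen hloop
      have hkiA : PySem.List.pyIdx? count1.length v = some ki := by
        rw [idx_congr graph count1 v hlen1.symm]; exact hki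
      have hkltA := idx_lt count1 v ki hkiA
      have hset1 := cellSet_of_idx count1 v (fun p => (p.1, sv + S)) ki hkiA
      set c1 := count1.set ki ((count1.getD ki (0, 0)).1, sv + S) with hc1
      have hki2 : PySem.List.pyIdx? c1.length v = some ki := by
        rw [hc1, List.length_set]; exact hkiA
      have hc1v : c1.getD ki (0, 0) = ((count1.getD ki (0, 0)).1, sv + S) := by
        rw [hc1, List.getD_eq_getElem _ _ (by simpa using hkltA), List.getElem_set_self (by simpa using hkltA)]
      cases hch : CH with
      | true =>
        simp only [hch, if_pos] at hF
        obtain rfl : (S, sv + S) = p := by simpa using hF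
        have hset2 := cellSet_of_idx c1 v (fun p => (S, p.2)) ki hki2
        rw [hc1v] at hset2
        refine ⟨c1.set ki (S, sv + S), ?_, by simp [hc1, hlen1], ?_⟩
        · rw [dfsA, hcs]
          simp only [if_neg hlf, hrunL, hsv, hch, if_pos, hset1, hset2,
            get_set_self c1 v (S, sv + S) ki hki2]
        · exact get_set_self c1 v (S, sv + S) ki hki2
      | false =>
        simp only [hch, Bool.false_eq_true, if_false] at hF
        cases hmin : PySem.List.min? ML (fun x => x) with
        | none => rw [hmin] at hF; simp at hF
        | some m =>
        simp only [hmin] at hF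
        obtain rfl : (S + m, sv + S) = p := by simpa using hF
        have hset2 := cellSet_of_idx c1 v (fun p => (S + m, p.2)) ki hki2
        rw [hc1v] at hset2
        refine ⟨c1.set ki (S + m, sv + S), ?_, by simp [hc1, hlen1], ?_⟩
        · rw [dfsA, hcs]
          simp only [if_neg hlf, hrunL, hsv, hch, hmin, hset1, hset2,
            get_set_self c1 v (S + m, sv + S) ki hki2, Bool.false_eq_true, if_false]
        · exact get_set_self c1 v (S + m, sv + S) ki hki2

-- ---- monotonicity of Fspec in the fuel ----
theorem Fl_mono (sales : List Int) (children : List (List Int)) (k : Nat)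
    (hm : ∀ (v : Int) (p : Int × Int), Fspec sales children k v = some p →
      Fspec sales children (k+1) v = some p) :
    ∀ (cs : List Int) (s : Int) (ml : List Int) (ch : Bool) (out : Int × List Int × Bool),
      Flspec sales children k cs s ml ch = some out →
      Flspec sales children (k+1) cs s ml ch = some out := by
  intro cs
  induction cs with
  | nil => intro s ml ch out h; rw [Flspec] at h ⊢; exact h
  | cons c r ih =>
    intro s ml ch out h
    rw [Flspec] at h ⊢
    cases hF : Fspec sales children k c with
    | none => rw [hF] at h; simp at h
    | some p =>
      simp only [hF] at h
      simp only [hm c p hF]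
      exact ih _ _ _ _ h

theorem F_mono (sales : List Int) (children : List (List Int)) :
    ∀ (k : Nat) (v : Int) (p : Int × Int), Fspec sales children k v = some p →
      Fspec sales children (k+1) v = some p := by
  intro k
  induction k with
  | zero => intro v p h; rw [Fspec] at h; simp at h
  | succ k ih =>
    intro v p h
    rw [Fspec] at h ⊢
    cases hcs : PySem.List.pyGet? children v with
    | none => rw [hcs] at h; simp at h
    | some cs =>
    simp only [hcs] at h ⊢
    by_cases hlf : cs.length = 0
    · simp only [if_pos hlf] at h ⊢; exact h
    · simp only [if_neg hlf] at h ⊢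
      cases hloop : Flspec sales children k cs 0 [] false with
      | none => rw [hloop] at h; simp at h
      | some out =>
      simp only [hloop] at h
      rw [Fl_mono sales children k ih cs 0 [] false out hloop]
      exact h

-- ---- termination: Fspec returns on the root under GoodCtx ----
def EdgeTo (children : List (List Int)) (a b : Int) : Prop :=
  ∃ cs, PySem.List.pyGet? children a = some cs ∧ b ∈ cs

def RPath (children : List (List Int)) : List Int → Prop
  | [] => False
  | [x] => x = 1
  | b :: a :: r => EdgeTo children a b ∧ RPath children (a :: r)

theorem rpath_R (sales : List Int) (children : List (List Int)) (R : List Int) (n : Nat)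
    (hg : TCtx sales children R n) :
    ∀ (q : List Int), RPath children q → ∀ x ∈ q, x ∈ R := by
  intro q
  induction q with
  | nil => intro h; rw [RPath] at h; exact absurd h id
  | cons b t ih =>
    intro h x hx
    cases t with
    | nil =>
      rw [RPath] at h
      obtain rfl : x = b := by simpa using hx
      rw [h]
      exact hg.2.2.2.1
    | cons a r =>
      rw [RPath] at h
      obtain ⟨he, hp⟩ := h
      rcases List.mem_cons.mp hx with rfl | hx'
      · obtain ⟨cs, hcs, hxc⟩ := he
        have haR : a ∈ R := ih hp a List.mem_cons_self
        exact (hg.2.2.2.2.2.2.1 a haR cs hcs x hxc).1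
      · exact ih hp x hx'

theorem rpath_bounds (sales : List Int) (children : List (List Int)) (R : List Int) (n : Nat)
    (hg : TCtx sales children R n) :
    ∀ (q : List Int), RPath children q → ∀ x ∈ q, 1 ≤ x ∧ x ≤ (n : Int) := by
  intro q hq x hx
  exact hg.2.2.2.2.2.1 x (rpath_R sales children R n hg q hq x hx)

theorem mem_pred (children : List (List Int)) :
    ∀ (q : List Int) (b : Int), RPath children q → b ∈ q → b ≠ 1 →
      ∃ a, EdgeTo children a b ∧ a ∈ q.tail := by
  intro q
  induction q with
  | nil => intro b h; rw [RPath] at h; exact absurd h id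
  | cons c t ih =>
    intro b h hb hb1
    cases t with
    | nil =>
      rw [RPath] at h
      subst h
      obtain rfl : b = (1 : Int) := by simpa using hb
      exact absurd rfl hb1
    | cons a r =>
      rw [RPath] at h
      obtain ⟨he, hp⟩ := h
      rcases List.mem_cons.mp hb with rfl | hb'
      · exact ⟨a, he, List.mem_cons_self⟩
      · obtain ⟨a', he', ha'⟩ := ih b hp hb' hb1
        exact ⟨a', he', List.mem_cons_of_mem _ ha'⟩

theorem rpath_extend (sales : List Int) (children : List (List Int)) (R : List Int) (n : Nat)
    (hg : TCtx sales children R n) (v b : Int) (r : List Int)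
    (hp : RPath children (v :: r)) (hnd : (v :: r).Nodup) (he : EdgeTo children v b) :
    RPath children (b :: v :: r) ∧ (b :: v :: r).Nodup := by
  refine ⟨by rw [RPath]; exact ⟨he, hp⟩, ?_⟩
  rw [List.nodup_cons]
  refine ⟨?_, hnd⟩
  intro hb
  have hvR : v ∈ R := rpath_R sales children R n hg (v :: r) hp v List.mem_cons_self
  obtain ⟨cs, hcs, hbc⟩ := he
  have hbb := (hg.2.2.2.2.2.2.1 v hvR cs hcs b hbc).2.1
  obtain ⟨a', he', ha'⟩ := mem_pred children (v :: r) b hp hb (by omega)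
  have haR : a' ∈ R := rpath_R sales children R n hg (v :: r) hp a'
    (List.mem_cons_of_mem _ (by simpa using ha'))
  obtain ⟨cs', hcs', hbc'⟩ := he'
  have hva : v = a' := hg.2.2.2.2.2.2.2 v a' hvR haR cs cs' b hcs hcs' hbc hbc'
  have : v ∉ r := (List.nodup_cons.mp hnd).1
  exact this (hva ▸ (by simpa using ha'))

theorem nodup_length_le (n : Nat) (q : List Int) (hnd : q.Nodup)
    (hb : ∀ x ∈ q, 1 ≤ x ∧ x ≤ (n : Int)) : q.length ≤ n := by
  have hsub : q.toFinset ⊆ Finset.Icc (1 : Int) n := by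
    intro x hx
    exact Finset.mem_Icc.mpr (hb x (List.mem_toFinset.mp hx))
  have h1 : q.toFinset.card = q.length := List.toFinset_card_of_nodup hnd
  have h2 := Finset.card_le_card hsub
  rw [Int.card_Icc] at h2
  omega

theorem Fl_total (sales : List Int) (children : List (List Int)) (k : Nat) :
    ∀ (cs : List Int) (s : Int) (ml : List Int) (ch : Bool),
      (∀ c ∈ cs, ∃ p, Fspec sales children k c = some p) →
      ∃ S ML CH, Flspec sales children k cs s ml ch = some (S, ML, CH) ∧
        ML.length = ml.length + cs.length := by
  intro cs
  induction cs with
  | nil => intro s ml ch _; exact ⟨s, ml, ch, by rw [Flspec], by simp⟩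
  | cons c r ih =>
    intro s ml ch hv
    obtain ⟨p, hp⟩ := hv c List.mem_cons_self
    obtain ⟨S, ML, CH, heq, hlen⟩ :=
      ih (s + min p.2 p.1) (ml ++ [p.2 - p.1]) (ch || decide (p.1 > p.2))
        (fun c' hc' => hv c' (List.mem_cons_of_mem _ hc'))
    refine ⟨S, ML, CH, ?_, by simp at hlen ⊢; omega⟩
    rw [Flspec]
    simp only [hp]
    exact heq

theorem term_F (sales : List Int) (children : List (List Int)) (R : List Int) (n : Nat)
    (hg : TCtx sales children R n) :
    ∀ (fuel : Nat) (v : Int) (r : List Int),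
      RPath children (v :: r) → (v :: r).Nodup → n + 1 ≤ fuel + (v :: r).length →
      ∃ p, Fspec sales children fuel v = some p := by
  intro fuel
  induction fuel with
  | zero =>
    intro v r hp hnd hlen
    have := nodup_length_le n (v :: r) hnd (rpath_bounds sales children R n hg (v :: r) hp)
    simp at hlen this
    omega
  | succ k ih =>
    intro v r hp hnd hlen
    have hv := rpath_bounds sales children R n hg (v :: r) hp v List.mem_cons_self
    have hvlt : v < (children.length : Int) := by rw [hg.2.2.1]; push_cast; omega
    have hidx := idx_pos children v (by omega) hvlt
    have hvn : v.toNat < children.length := idx_lt children v v.toNat hidx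
    have hgetc : PySem.List.pyGet? children v = some children[v.toNat] := by
      rw [get_of_idx _ v v.toNat hidx, List.getElem?_eq_getElem hvn]
    have hsidx : PySem.List.pyIdx? sales.length (v - 1) = some (v - 1).toNat := by
      refine idx_pos sales (v - 1) (by omega) ?_
      rw [hg.1]; omega
    have hslt : (v - 1).toNat < sales.length := idx_lt sales (v - 1) _ hsidx
    have hgets : PySem.List.pyGet? sales (v - 1) = some sales[(v - 1).toNat] := by
      rw [get_of_idx _ _ _ hsidx, List.getElem?_eq_getElem hslt]
    rw [Fspec]
    rw [hgetc]
    by_cases hlf : children[v.toNat].length = 0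
    · exact ⟨(0, sales[(v - 1).toNat]), by simp only [if_pos hlf, hgets]⟩
    · simp only [if_neg hlf]
      have hFl : ∀ c ∈ children[v.toNat], ∃ p, Fspec sales children k c = some p := by
        intro c hc
        have he : EdgeTo children v c := ⟨children[v.toNat], hgetc, hc⟩
        obtain ⟨hp', hnd'⟩ := rpath_extend sales children R n hg v c r hp hnd he
        refine ih c (v :: r) hp' hnd' ?_
        simp at hlen ⊢
        omega
      obtain ⟨S, ML, CH, heq, hmlen⟩ :=
        Fl_total sales children k children[v.toNat] 0 [] false hFl
      rw [heq, hgets]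
      have hML : ML ≠ [] := by
        intro hnil
        rw [hnil] at hmlen
        simp at hmlen
        omega
      cases hCH : CH with
      | true => exact ⟨(S, sales[(v - 1).toNat] + S), by simp⟩
      | false =>
        cases hmin : PySem.List.min? ML (fun x => x) with
        | none => exact absurd (PySem.List.min?_eq_none_iff ML _ |>.mp hmin) hML
        | some m => exact ⟨(S + m, sales[(v - 1).toNat] + S), by simp [hmin]⟩

-- ---- B's pass computes one step of Fspec ----
theorem triple (sales : List Int) (children : List (List Int)) (k : Nat)
    (keep skip : List Int) :
    ∀ (cs : List Int) (s : Int) (ml : List Int) (ch : Bool) (S : Int) (ML : List Int) (CH : Bool),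
      (∀ c ∈ cs, ∀ p : Int × Int, Fspec sales children k c = some p →
        PySem.List.pyGet? keep c = some p.2 ∧ PySem.List.pyGet? skip c = some p.1) →
      Flspec sales children k cs s ml ch = some (S, ML, CH) →
      sumMins keep skip cs s = some S ∧
      (∃ b, anyGT keep skip cs = some b ∧ CH = (ch || b)) ∧
      (∃ ds, diffsB keep skip cs = some ds ∧ ML = ml ++ ds) := by
  intro cs
  induction cs with
  | nil =>
    intro s ml ch S ML CH _ h
    rw [Flspec] at h
    obtain ⟨rfl, rfl, rfl⟩ : s = S ∧ ml = ML ∧ ch = CH := by simpa using h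
    exact ⟨by rw [sumMins], ⟨false, by rw [anyGT], by simp⟩, ⟨[], by rw [diffsB], by simp⟩⟩
  | cons c r ih =>
    intro s ml ch S ML CH hv h
    rw [Flspec] at h
    cases hF : Fspec sales children k c with
    | none => rw [hF] at h; simp at h
    | some p =>
    simp only [hF] at h
    obtain ⟨hk, hs⟩ := hv c List.mem_cons_self p hF
    have hv' := fun c' hc' => hv c' (List.mem_cons_of_mem _ hc')
    obtain ⟨hsum, ⟨b, hany, hCH⟩, ⟨ds, hds, hML⟩⟩ := ih _ _ _ S ML CH hv' h
    refine ⟨?_, ?_, ?_⟩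
    · rw [sumMins]
      simp only [hk, hs]
      exact hsum
    · by_cases hgt : p.1 > p.2
      · refine ⟨true, ?_, ?_⟩
        · rw [anyGT]; simp only [hs, hk, if_pos hgt]
        · simp only [hgt, decide_true] at hCH
          simp [hCH]
      · refine ⟨b, ?_, ?_⟩
        · rw [anyGT]; simp only [hs, hk, if_neg hgt]; exact hany
        · simp only [hgt, decide_false, Bool.or_false] at hCH
          exact hCH
    · refine ⟨(p.2 - p.1) :: ds, ?_, ?_⟩
      · rw [diffsB]; simp only [hk, hs, hds]
      · simp [hML]

theorem sumMins_total (keep skip : List Int) :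
    ∀ (cs : List Int) (acc : Int),
      (∀ c ∈ cs, PySem.List.pyGet? keep c ≠ none ∧ PySem.List.pyGet? skip c ≠ none) →
      ∃ x, sumMins keep skip cs acc = some x := by
  intro cs
  induction cs with
  | nil => intro acc _; exact ⟨acc, by rw [sumMins]⟩
  | cons c r ih =>
    intro acc hv
    obtain ⟨hk, hs⟩ := hv c List.mem_cons_self
    cases hgk : PySem.List.pyGet? keep c with
    | none => exact absurd hgk hk
    | some k0 =>
    cases hgs : PySem.List.pyGet? skip c with
    | none => exact absurd hgs hs
    | some s0 =>
    obtain ⟨x, hx⟩ := ih (acc + min k0 s0) (fun c' hc' => hv c' (List.mem_cons_of_mem _ hc'))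
    exact ⟨x, by rw [sumMins]; simp only [hgk, hgs]; exact hx⟩

theorem anyGT_total (keep skip : List Int) :
    ∀ (cs : List Int),
      (∀ c ∈ cs, PySem.List.pyGet? keep c ≠ none ∧ PySem.List.pyGet? skip c ≠ none) →
      ∃ b, anyGT keep skip cs = some b := by
  intro cs
  induction cs with
  | nil => exact fun _ => ⟨false, by rw [anyGT]⟩
  | cons c r ih =>
    intro hv
    obtain ⟨hk, hs⟩ := hv c List.mem_cons_self
    cases hgk : PySem.List.pyGet? keep c with
    | none => exact absurd hgk hk
    | some k0 =>
    cases hgs : PySem.List.pyGet? skip c with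
    | none => exact absurd hgs hs
    | some s0 =>
    by_cases hgt : s0 > k0
    · exact ⟨true, by rw [anyGT]; simp only [hgs, hgk, if_pos hgt]⟩
    · obtain ⟨b, hb⟩ := ih (fun c' hc' => hv c' (List.mem_cons_of_mem _ hc'))
      exact ⟨b, by rw [anyGT]; simp only [hgs, hgk, if_neg hgt]; exact hb⟩

theorem diffsB_total (keep skip : List Int) :
    ∀ (cs : List Int),
      (∀ c ∈ cs, PySem.List.pyGet? keep c ≠ none ∧ PySem.List.pyGet? skip c ≠ none) →
      ∃ ds, diffsB keep skip cs = some ds ∧ ds.length = cs.length := by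
  intro cs
  induction cs with
  | nil => exact fun _ => ⟨[], by rw [diffsB], rfl⟩
  | cons c r ih =>
    intro hv
    obtain ⟨hk, hs⟩ := hv c List.mem_cons_self
    cases hgk : PySem.List.pyGet? keep c with
    | none => exact absurd hgk hk
    | some k0 =>
    cases hgs : PySem.List.pyGet? skip c with
    | none => exact absurd hgs hs
    | some s0 =>
    obtain ⟨ds, hds, hdl⟩ := ih (fun c' hc' => hv c' (List.mem_cons_of_mem _ hc'))
    exact ⟨(k0 - s0) :: ds, by rw [diffsB]; simp only [hgk, hgs, hds], by simp [hdl]⟩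

theorem get_append_left_int {α : Type} (xs : List α) (x : α) (v : Int)
    (h0 : 0 ≤ v) (h1 : v < (xs.length : Int)) :
    PySem.List.pyGet? (xs ++ [x]) v = PySem.List.pyGet? xs v := by
  rw [PySem.List.pyGet?_of_nonneg _ h0, PySem.List.pyGet?_of_nonneg _ h0]
  exact List.getElem?_append_left (by omega)

theorem get_append_last_int {α : Type} (xs : List α) (x : α) (v : Int)
    (hv : v = (xs.length : Int)) :
    PySem.List.pyGet? (xs ++ [x]) v = some x := by
  subst hv
  rw [PySem.List.pyGet?_of_nonneg _ (by positivity)]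
  simp

theorem get_some_of_inrange {α : Type} (xs : List α) (v : Int)
    (h0 : -(xs.length : Int) ≤ v) (h1 : v < (xs.length : Int)) :
    PySem.List.pyGet? xs v ≠ none := by
  rw [Ne, PySem.List.pyGet?_eq_none_iff]
  exact fun h => h ⟨h0, h1⟩

theorem pass_step (sales : List Int) (children : List (List Int)) (R : List Int) (n k : Nat)
    (keep skip : List Int) (hg : TCtx sales children R n)
    (hk : keep.length = n + 1) (hs : skip.length = n + 1)
    (hq : ∀ (v : Int) (p : Int × Int), v ∈ R →
      Fspec sales children k v = some p →
      PySem.List.pyGet? keep v = some p.2 ∧ PySem.List.pyGet? skip v = some p.1) :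
    ∃ nk ns, passB sales children n keep skip = some (nk, ns) ∧
      nk.length = n + 1 ∧ ns.length = n + 1 ∧
      (∀ (v : Int) (p : Int × Int), v ∈ R →
        Fspec sales children (k+1) v = some p →
        PySem.List.pyGet? nk v = some p.2 ∧ PySem.List.pyGet? ns v = some p.1) := by
  obtain ⟨hsal, hn1, hchl, hR1, hread, hRb, hRc, hU⟩ := hg
  have main : ∀ m : Nat, m ≤ n → ∃ nk ns,
      (PySem.List.pyRange 1 ((m : Int) + 1) 1).foldl (passBody sales children keep skip)
        (some ([0], [0])) = some (nk, ns) ∧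
      nk.length = m + 1 ∧ ns.length = m + 1 ∧
      (∀ (v : Int) (p : Int × Int), 1 ≤ v → v ≤ (m : Int) → v ∈ R →
        Fspec sales children (k+1) v = some p →
        PySem.List.pyGet? nk v = some p.2 ∧ PySem.List.pyGet? ns v = some p.1) := by
    intro m
    induction m with
    | zero =>
      intro _
      refine ⟨[0], [0], ?_, rfl, rfl, ?_⟩
      · rw [PySem.List.pyRange_one_eq_nil (by norm_num)]
        rfl
      · intro v p h1 h2 _ _
        exact absurd (h1.trans h2) (by norm_num)
    | succ m ih =>
      intro hmn
      obtain ⟨nk, ns, hfold, hnk, hns, hspec⟩ := ih (by omega)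
      have hrange : PySem.List.pyRange 1 (((m : Nat) + 1 : Int) + 1) 1 =
          PySem.List.pyRange 1 ((m : Int) + 1) 1 ++ [(m : Int) + 1] := by
        exact_mod_cast PySem.List.pyRange_one_succ_right (a := 1) (b := (m : Int) + 1)
          (by omega)
      -- reads at v = m+1
      have hvlt : ((m : Int) + 1) < (children.length : Int) := by rw [hchl]; push_cast; omega
      have hidx := idx_pos children ((m : Int) + 1) (by omega) hvlt
      have hvt : ((m : Int) + 1).toNat = m + 1 := by omega
      rw [hvt] at hidx
      have hmlt : m + 1 < children.length := by omega
      have hgetc : PySem.List.pyGet? children ((m : Int) + 1) = some children[m + 1] := by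
        rw [get_of_idx _ _ _ hidx, List.getElem?_eq_getElem hmlt]
      have hslt : m < sales.length := by omega
      have hsidx : PySem.List.pyIdx? sales.length ((m : Int) + 1 - 1) = some m := by
        have := idx_pos sales ((m : Int) + 1 - 1) (by omega) (by rw [hsal]; push_cast; omega)
        simpa using this
      have hgets : PySem.List.pyGet? sales ((m : Int) + 1 - 1) = some sales[m] := by
        rw [get_of_idx _ _ _ hsidx, List.getElem?_eq_getElem hslt]
      by_cases hcs : children[m + 1] = []
      · -- leaf row
        refine ⟨nk ++ [sales[m]], ns ++ [(0 : Int)], ?_, by simp [hnk], by simp [hns], ?_⟩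
        · push_cast
          rw [hrange, List.foldl_append, hfold]
          show passBody sales children keep skip (some (nk, ns)) ((m : Int) + 1) = _
          rw [passBody, hgetc]
          simp only [hcs, ne_eq, not_true_eq_false, if_false, hgets]
        · intro v p h1 h2 hvR hF
          by_cases hvm : v ≤ (m : Int)
          · have hrd := hspec v p h1 hvm hvR hF
            rw [get_append_left_int _ _ v (by omega) (by rw [hnk]; push_cast; omega),
              get_append_left_int _ _ v (by omega) (by rw [hns]; push_cast; omega)]
            exact hrd
          · have hv : v = (m : Int) + 1 := by push_cast at h2; omega
            subst hv
            rw [Fspec] at hF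
            rw [hgetc] at hF
            simp only [hcs] at hF
            simp only [List.length_nil, if_pos, hgets] at hF
            obtain rfl : ((0 : Int), sales[m]) = p := by simpa using hF
            constructor
            · rw [get_append_last_int _ _ _ (by rw [hnk]; push_cast; omega)]
            · rw [get_append_last_int _ _ _ (by rw [hns]; push_cast; omega)]
      · -- internal row
        have hmem : ∀ c ∈ children[m + 1], -((n : Int) + 1) ≤ c ∧ c ≤ (n : Int) :=
          hread ((m : Int) + 1) children[m + 1] (by omega) (by push_cast; omega) hgetc
        have hreads : ∀ c ∈ children[m + 1],
            PySem.List.pyGet? keep c ≠ none ∧ PySem.List.pyGet? skip c ≠ none := by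
          intro c hc
          obtain ⟨hc2, hcn⟩ := hmem c hc
          constructor
          · exact get_some_of_inrange keep c (by rw [hk]; push_cast; omega)
              (by rw [hk]; push_cast; omega)
          · exact get_some_of_inrange skip c (by rw [hs]; push_cast; omega)
              (by rw [hs]; push_cast; omega)
        obtain ⟨base, hbase⟩ := sumMins_total keep skip children[m + 1] 0 hreads
        obtain ⟨b, hb⟩ := anyGT_total keep skip children[m + 1] hreads
        obtain ⟨ds, hds, hdsl⟩ := diffsB_total keep skip children[m + 1] hreads
        have hdsne : ds ≠ [] := by
          intro h0
          rw [h0] at hdsl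
          exact hcs (List.length_eq_zero_iff.mp hdsl.symm)
        obtain ⟨mm, hmm⟩ : ∃ mm, PySem.List.min? ds (fun x => x) = some mm := by
          cases hx : PySem.List.min? ds (fun x => x) with
          | none => exact absurd ((PySem.List.min?_eq_none_iff ds _).mp hx) hdsne
          | some mm => exact ⟨mm, rfl⟩
        have hrun : passBody sales children keep skip (some (nk, ns)) ((m : Int) + 1) =
            some (nk ++ [sales[m] + base], ns ++ [if b then base else base + mm]) := by
          rw [passBody, hgetc]
          simp only [hcs, ne_eq, not_false_eq_true, if_true, hbase, hgets, hb, hds, hmm]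
          cases b <;> simp
        refine ⟨nk ++ [sales[m] + base], ns ++ [if b then base else base + mm], ?_,
          by simp [hnk], by simp [hns], ?_⟩
        · push_cast
          rw [hrange, List.foldl_append, hfold]
          exact hrun
        · intro v p h1 h2 hvR hF
          by_cases hvm : v ≤ (m : Int)
          · have hrd := hspec v p h1 hvm hvR hF
            rw [get_append_left_int _ _ v (by omega) (by rw [hnk]; push_cast; omega),
              get_append_left_int _ _ v (by omega) (by rw [hns]; push_cast; omega)]
            exact hrd
          · have hv : v = (m : Int) + 1 := by push_cast at h2; omega
            subst hv
            rw [Fspec] at hF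
            rw [hgetc] at hF
            simp only [List.length_eq_zero_iff, hcs, if_neg, if_false] at hF
            cases hloop : Flspec sales children k children[m + 1] 0 [] false with
            | none => rw [hloop] at hF; simp at hF
            | some out =>
            obtain ⟨S, ML, CH⟩ := out
            simp only [hloop, hgets] at hF
            have hv' : ∀ c ∈ children[m + 1], ∀ p' : Int × Int,
                Fspec sales children k c = some p' →
                PySem.List.pyGet? keep c = some p'.2 ∧ PySem.List.pyGet? skip c = some p'.1 := by
              intro c hc p' hp'
              have hcR : c ∈ R := (hRc _ hvR children[m + 1] hgetc c hc).1
              exact hq c p' hcR hp'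
            obtain ⟨hsum, ⟨b', hany, hCH⟩, ⟨ds', hds', hML⟩⟩ :=
              triple sales children k keep skip children[m + 1] 0 [] false S ML CH hv' hloop
            obtain rfl : base = S := by rw [hbase] at hsum; exact (Option.some.injEq _ _).mp hsum
            have hbb : b = b' := by rw [hb] at hany; exact (Option.some.injEq _ _).mp hany
            have hdd : ds = ds' := by rw [hds] at hds'; exact (Option.some.injEq _ _).mp hds'
            simp only [Bool.false_or] at hCH
            rw [← hbb] at hCH
            rw [← hdd, List.nil_append] at hML
            cases hbv : b with
            | true =>
              rw [hCH, hbv] at hF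
              simp only [if_pos] at hF
              obtain rfl : (base, sales[m] + base) = p := by simpa using hF
              constructor
              · rw [get_append_last_int _ _ _ (by rw [hnk]; push_cast; omega)]
              · rw [get_append_last_int _ _ _ (by rw [hns]; push_cast; omega)]
                simp [hbv]
            | false =>
              rw [hCH, hbv] at hF
              rw [hML] at hF
              simp only [Bool.false_eq_true, if_false, hmm] at hF
              obtain rfl : (base + mm, sales[m] + base) = p := by simpa using hF
              constructor
              · rw [get_append_last_int _ _ _ (by rw [hnk]; push_cast; omega)]
              · rw [get_append_last_int _ _ _ (by rw [hns]; push_cast; omega)]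
                simp [hbv]
  obtain ⟨nk, ns, hfold, h1, h2, h3⟩ := main n (le_refl n)
  refine ⟨nk, ns, by rw [passB]; exact hfold, h1, h2, ?_⟩
  intro v p hvR hF
  obtain ⟨hv1, hvn⟩ := hRb v hvR
  exact h3 v p hv1 hvn hvR hF

-- ---- iteration of the pass ----
def pstepFn (sales : List Int) (children : List (List Int)) (n : Nat)
    (st : List Int × List Int) : List Int × List Int :=
  match passB sales children n st.1 st.2 with
  | some st' => st'
  | none => st

theorem pass_iter (sales : List Int) (children : List (List Int)) (R : List Int) (n : Nat)
    (hg : TCtx sales children R n) :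
    ∀ (k : Nat), ∃ keep skip,
      (pstepFn sales children n)^[k] (List.replicate (n+1) 0, List.replicate (n+1) 0) =
        (keep, skip) ∧ keep.length = n + 1 ∧ skip.length = n + 1 ∧
      (∀ (v : Int) (p : Int × Int), v ∈ R →
        Fspec sales children k v = some p →
        PySem.List.pyGet? keep v = some p.2 ∧ PySem.List.pyGet? skip v = some p.1) := by
  intro k
  induction k with
  | zero =>
    refine ⟨List.replicate (n+1) 0, List.replicate (n+1) 0, rfl, by simp, by simp, ?_⟩
    intro v p _ hF
    rw [Fspec] at hF
    simp at hF
  | succ k ih =>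
    obtain ⟨keep, skip, hit, hkl, hsl, hq⟩ := ih
    obtain ⟨nk, ns, hpass, hnkl, hnsl, hq'⟩ :=
      pass_step sales children R n k keep skip hg hkl hsl hq
    refine ⟨nk, ns, ?_, hnkl, hnsl, hq'⟩
    rw [Function.iterate_succ_apply', hit, pstepFn]
    simp only [hpass]

theorem roundsB_eq (sales : List Int) (children : List (List Int)) (R : List Int) (n : Nat)
    (hg : TCtx sales children R n) :
    ∀ (k : Nat) (st : List Int × List Int), st.1.length = n + 1 → st.2.length = n + 1 →
      roundsB sales children n k st = some ((pstepFn sales children n)^[k] st) := by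
  intro k
  induction k with
  | zero => intro st _ _; rw [roundsB]; rfl
  | succ k ih =>
    intro st h1 h2
    obtain ⟨keep, skip⟩ := st
    obtain ⟨nk, ns, hpass, hnkl, hnsl, _⟩ := pass_step sales children R n 0 keep skip hg h1 h2
      (by intro v p _ hF; rw [Fspec] at hF; simp at hF)
    rw [roundsB]
    simp only [hpass]
    have hstep : pstepFn sales children n (keep, skip) = (nk, ns) := by
      rw [pstepFn]; simp only [hpass]
    by_cases heq : nk = keep ∧ ns = skip
    · rw [if_pos heq]
      have hfix : pstepFn sales children n (keep, skip) = (keep, skip) := by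
        rw [hstep, heq.1, heq.2]
      rw [Function.iterate_fixed hfix]
    · rw [if_neg heq, ih (nk, ns) hnkl hnsl, Function.iterate_succ_apply, hstep]

-- ---- the built adjacency and the reach set give a TCtx ----
def rowOf (n : Nat) (links : List (List Int)) (i : Nat) : List Int :=
  links.filterMap (fun l => if linkRow n l = some i then some (l.getD 1 0) else none)

theorem rowOf_mem (n : Nat) (links : List (List Int)) (i : Nat) (c : Int) :
    c ∈ rowOf n links i ↔ ∃ l ∈ links, linkRow n l = some i ∧ l.getD 1 0 = c := by
  simp [rowOf, List.mem_filterMap, Option.ite_none_right_eq_some]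

theorem idx_ltN (N : Nat) (v : Int) (k : Nat) (h : PySem.List.pyIdx? N v = some k) : k < N := by
  unfold PySem.List.pyIdx? at h
  split_ifs at h <;> simp_all <;> omega

theorem build_rows (n : Nat) :
    ∀ (links : List (List Int)) (g : List (List Int)),
      (∀ l ∈ links, 2 ≤ l.length ∧ (linkRow n l).isSome) →
      g.length = n + 1 →
      ∃ g', links.foldl buildStep (some g) = some g' ∧ g'.length = n + 1 ∧
        (∀ i, i < n + 1 → g'.getD i [] = g.getD i [] ++ rowOf n links i) := by
  intro links
  induction links with
  | nil =>
    intro g _ hg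
    exact ⟨g, by simp, hg, by intro i _; simp [rowOf]⟩
  | cons l ls ih =>
    intro g hl hg
    obtain ⟨hlen2, hsome⟩ := hl l List.mem_cons_self
    obtain ⟨i0, hi0⟩ := Option.isSome_iff_exists.mp hsome
    have hi0n : i0 < n + 1 := idx_ltN (n + 1) _ i0 hi0
    have h0lt : 0 < l.length := by omega
    have h1lt : 1 < l.length := by omega
    have hget0 : PySem.List.pyGet? l 0 = some (l.getD 0 0) := by
      rw [PySem.List.pyGet?_of_nonneg _ (by norm_num)]
      simp [List.getElem?_eq_getElem h0lt, List.getD_eq_getElem _ _ h0lt]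
    have hget1 : PySem.List.pyGet? l 1 = some (l.getD 1 0) := by
      rw [PySem.List.pyGet?_of_nonneg _ (by norm_num)]
      simp [List.getElem?_eq_getElem h1lt, List.getD_eq_getElem _ _ h1lt]
    have hidxg : PySem.List.pyIdx? g.length (l.getD 0 0) = some i0 := by
      rw [hg]; exact hi0
    have hi0g : i0 < g.length := by omega
    have hgetg : PySem.List.pyGet? g (l.getD 0 0) = some (g.getD i0 []) := by
      rw [get_of_idx _ _ _ hidxg, List.getElem?_eq_getElem hi0g,
        List.getD_eq_getElem _ _ hi0g]
    have hset := set_of_idx g (l.getD 0 0) (g.getD i0 [] ++ [l.getD 1 0]) _ hidxg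
    have hstep : buildStep (some g) l =
        some (g.set i0 (g.getD i0 [] ++ [l.getD 1 0])) := by
      rw [buildStep]
      simp only [hget0, hgetg, hget1, hset]
    obtain ⟨g', hfold, hlen, hrows⟩ :=
      ih (g.set i0 (g.getD i0 [] ++ [l.getD 1 0]))
        (fun l' hl' => hl l' (List.mem_cons_of_mem _ hl'))
        (by rw [List.length_set]; exact hg)
    refine ⟨g', by rw [List.foldl_cons, hstep]; exact hfold, hlen, ?_⟩
    intro i hi
    rw [hrows i hi]
    have hrowcons : rowOf n (l :: ls) i =
        if linkRow n l = some i then l.getD 1 0 :: rowOf n ls i else rowOf n ls i := by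
      simp only [rowOf, List.filterMap_cons]
      split_ifs with h <;> simp [h]
    by_cases hii : i = i0
    · subst hii
      have : (g.set i (g.getD i [] ++ [l.getD 1 0])).getD i [] =
          g.getD i [] ++ [l.getD 1 0] := by
        rw [List.getD_eq_getElem?_getD, List.getElem?_set_self (by omega)]
        rfl
      rw [this, hrowcons, if_pos hi0]
      simp
    · have : (g.set i0 (g.getD i0 [] ++ [l.getD 1 0])).getD i [] = g.getD i [] := by
        rw [List.getD_eq_getElem?_getD, List.getElem?_set_ne (by omega),
          ← List.getD_eq_getElem?_getD]
      rw [this, hrowcons, if_neg (by simp [hi0]; omega)]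

-- ---- the reach closure ----
theorem reachPass_prefix (n : Nat) (links : List (List Int)) :
    ∀ (S : List Int), S <+: reachPass n links S := by
  suffices h : ∀ (ls : List (List Int)) (S : List Int),
      S <+: ls.foldl (fun S l =>
        match linkRow n l with
        | some i => if (i : Int) ∈ S ∧ l.getD 1 0 ∉ S then S ++ [l.getD 1 0] else S
        | none => S) S by
    intro S; exact h links S
  intro ls
  induction ls with
  | nil => intro S; exact List.prefix_rfl
  | cons l ls ih =>
    intro S
    rw [List.foldl_cons]
    refine List.IsPrefix.trans ?_ (ih _)
    show S <+: (match linkRow n l with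
      | some i => if (i : Int) ∈ S ∧ l.getD 1 0 ∉ S then S ++ [l.getD 1 0] else S
      | none => S)
    cases hr : linkRow n l with
    | none => simp
    | some i =>
      simp only
      split_ifs <;> simp
theorem reachL_prefix (n : Nat) (links : List (List Int)) :
    ∀ (f : Nat) (S : List Int), S <+: reachL n links f S := by
  intro f
  induction f with
  | zero => intro S; rw [reachL]
  | succ f ih =>
    intro S
    rw [reachL]
    split_ifs with h
    · exact List.prefix_rfl
    · exact (reachPass_prefix n links S).trans (ih _)

theorem reachPass_mem (n : Nat) (links : List (List Int)) :
    ∀ (S : List Int) (v : Int), v ∈ reachPass n links S →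
      v ∈ S ∨ ∃ l ∈ links, ∃ i, linkRow n l = some i ∧
        ((i : Nat) : Int) ∈ reachPass n links S ∧ l.getD 1 0 = v := by
  suffices h : ∀ (ls : List (List Int)), ls.Sublist links → ∀ (S : List Int) (v : Int),
      v ∈ ls.foldl (fun S l =>
        match linkRow n l with
        | some i => if (i : Int) ∈ S ∧ l.getD 1 0 ∉ S then S ++ [l.getD 1 0] else S
        | none => S) S →
      v ∈ S ∨ ∃ l ∈ links, ∃ i, linkRow n l = some i ∧
        ((i : Nat) : Int) ∈ ls.foldl (fun S l =>
          match linkRow n l with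
          | some i => if (i : Int) ∈ S ∧ l.getD 1 0 ∉ S then S ++ [l.getD 1 0] else S
          | none => S) S ∧ l.getD 1 0 = v by
    intro S v hv
    exact h links (List.Sublist.refl links) S v hv
  intro ls
  induction ls with
  | nil => intro _ S v hv; exact Or.inl hv
  | cons l ls ih =>
    intro hsub S v hv
    have hsub' : ls.Sublist links := (List.sublist_cons_self l ls).trans hsub
    have hlm : l ∈ links := hsub.subset List.mem_cons_self
    have hpre : ∀ (T : List Int), T <+: ls.foldl (fun S l =>
        match linkRow n l with
        | some i => if (i : Int) ∈ S ∧ l.getD 1 0 ∉ S then S ++ [l.getD 1 0] else S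
        | none => S) T := by
      intro T
      have := reachPass_prefix n ls T
      simpa [reachPass] using this
    rw [List.foldl_cons] at hv
    rcases ih hsub' _ v hv with hv' | ⟨l', hl', i, hr, hiS, hc⟩
    · -- v entered at the head step or was already in S
      have hv'' : v ∈ (match linkRow n l with
        | some i => if (i : Int) ∈ S ∧ l.getD 1 0 ∉ S then S ++ [l.getD 1 0] else S
        | none => S) := hv'
      clear hv'
      cases hr : linkRow n l with
      | none =>
        simp only [hr] at hv''
        exact Or.inl hv''
      | some i =>
        simp only [hr] at hv''
        by_cases hcond : (i : Int) ∈ S ∧ l.getD 1 0 ∉ S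
        · rw [if_pos hcond] at hv''
          rcases List.mem_append.mp hv'' with h1 | h1
          · exact Or.inl h1
          · obtain rfl : v = l.getD 1 0 := by simpa using h1
            refine Or.inr ⟨l, hlm, i, hr, ?_, rfl⟩
            have hiS' : ((i : Nat) : Int) ∈ S ++ [l.getD 1 0] := by
              exact List.mem_append.mpr (Or.inl hcond.1)
            have hsb := (hpre (S ++ [l.getD 1 0])).subset hiS'
            rw [List.foldl_cons]
            have hbody : (match linkRow n l with
              | some i => if (i : Int) ∈ S ∧ l.getD 1 0 ∉ S then S ++ [l.getD 1 0] else S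
              | none => S) = S ++ [l.getD 1 0] := by
              simp only [hr]
              rw [if_pos hcond]
            show ((i : Nat) : Int) ∈ List.foldl _ (match linkRow n l with
              | some i => if (i : Int) ∈ S ∧ l.getD 1 0 ∉ S then S ++ [l.getD 1 0] else S
              | none => S) ls
            rw [hbody]
            exact hsb
        · rw [if_neg hcond] at hv''
          exact Or.inl hv''
    · rw [List.foldl_cons]
      exact Or.inr ⟨l', hl', i, hr, hiS, hc⟩

theorem reachL_mem (n : Nat) (links : List (List Int)) :
    ∀ (f : Nat) (S : List Int) (v : Int), v ∈ reachL n links f S →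
      v ∈ S ∨ ∃ l ∈ links, ∃ i, linkRow n l = some i ∧
        ((i : Nat) : Int) ∈ reachL n links f S ∧ l.getD 1 0 = v := by
  intro f
  induction f with
  | zero => intro S v hv; rw [reachL] at hv; exact Or.inl hv
  | succ f ih =>
    intro S v hv
    rw [reachL] at hv ⊢
    split_ifs at hv ⊢ with hst
    · exact Or.inl hv
    · rcases ih _ v hv with hv' | ⟨l, hl, i, hr, hiS, hc⟩
      · rcases reachPass_mem n links S v hv' with h1 | ⟨l, hl, i, hr, hiS, hc⟩
        · exact Or.inl h1
        · exact Or.inr ⟨l, hl, i, hr, (reachL_prefix n links f _).subset hiS, hc⟩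
      · exact Or.inr ⟨l, hl, i, hr, hiS, hc⟩

theorem pass_stable_closed (n : Nat) (links : List (List Int)) (S : List Int)
    (hstab : reachPass n links S = S) :
    ∀ l ∈ links, ∀ i, linkRow n l = some i → ((i : Nat) : Int) ∈ S → l.getD 1 0 ∈ S := by
  suffices h : ∀ (ls : List (List Int)) (S : List Int),
      ls.foldl (fun S l =>
        match linkRow n l with
        | some i => if (i : Int) ∈ S ∧ l.getD 1 0 ∉ S then S ++ [l.getD 1 0] else S
        | none => S) S = S →
      ∀ l ∈ ls, ∀ i, linkRow n l = some i → ((i : Nat) : Int) ∈ S → l.getD 1 0 ∈ S by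
    exact h links S hstab
  intro ls
  induction ls with
  | nil => intro S _ l hl; simp at hl
  | cons l0 ls ih =>
    intro S hfold l hl i hr hiS
    have hpre1 : S <+: (match linkRow n l0 with
        | some i => if (i : Int) ∈ S ∧ l0.getD 1 0 ∉ S then S ++ [l0.getD 1 0] else S
        | none => S) := by
      cases hr0 : linkRow n l0 with
      | none => simp
      | some j => simp only; split_ifs <;> simp
    have hpre2 : (match linkRow n l0 with
        | some i => if (i : Int) ∈ S ∧ l0.getD 1 0 ∉ S then S ++ [l0.getD 1 0] else S
        | none => S) <+: S := by
      rw [List.foldl_cons] at hfold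
      have h2 : (match linkRow n l0 with
          | some i => if (i : Int) ∈ S ∧ l0.getD 1 0 ∉ S then S ++ [l0.getD 1 0] else S
          | none => S) <+: List.foldl (fun S l =>
            match linkRow n l with
            | some i => if (i : Int) ∈ S ∧ l.getD 1 0 ∉ S then S ++ [l.getD 1 0] else S
            | none => S) (match linkRow n l0 with
          | some i => if (i : Int) ∈ S ∧ l0.getD 1 0 ∉ S then S ++ [l0.getD 1 0] else S
          | none => S) ls := by
        have := reachPass_prefix n ls (match linkRow n l0 with
          | some i => if (i : Int) ∈ S ∧ l0.getD 1 0 ∉ S then S ++ [l0.getD 1 0] else S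
          | none => S)
        simpa [reachPass] using this
      rw [hfold] at h2
      exact h2
    have hstep : (match linkRow n l0 with
        | some i => if (i : Int) ∈ S ∧ l0.getD 1 0 ∉ S then S ++ [l0.getD 1 0] else S
        | none => S) = S :=
      hpre2.eq_of_length (by
        have h1 := hpre1.length_le
        have h2 := hpre2.length_le
        omega)
    rcases List.mem_cons.mp hl with rfl | hl'
    · simp only [hr] at hstep
      by_cases hcond : ((i : Nat) : Int) ∈ S ∧ l.getD 1 0 ∉ S
      · rw [if_pos hcond] at hstep
        have := congrArg List.length hstep
        simp at this
      · rw [not_and_or] at hcond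
        rcases hcond with h1 | h1
        · exact absurd hiS h1
        · simpa using h1
    · refine ih S ?_ l hl' i hr hiS
      rw [List.foldl_cons] at hfold
      rw [hstep] at hfold
      exact hfold

theorem pre_ctx (sales : List Int) (links : List (List Int))
    (hpre : Pre_solution sales links) :
    ∃ children, buildAdj (sales.length + 1) links = some children ∧
      TCtx sales children (reachSet sales links) sales.length := by
  obtain ⟨hne, hsafe, hstab, hreach, hpair⟩ := hpre
  have hn : 1 ≤ sales.length := List.length_pos_iff.mpr hne
  obtain ⟨g', hfold, hlen, hrows⟩ :=
    build_rows sales.length links (List.replicate (sales.length + 1) [])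
      (fun l hl => ⟨(hsafe l hl).1, (hsafe l hl).2.1⟩) (by simp)
  have hrows' : ∀ i, i < sales.length + 1 → g'.getD i [] = rowOf sales.length links i := by
    intro i hi
    rw [hrows i hi]
    simp
  have hrow_get : ∀ (v : Int) (cs : List Int), 0 ≤ v → v < ((sales.length : Int) + 1) →
      PySem.List.pyGet? g' v = some cs → cs = rowOf sales.length links v.toNat := by
    intro v cs h0 h1 hget
    have hidx : PySem.List.pyIdx? g'.length v = some v.toNat :=
      idx_pos g' v h0 (by rw [hlen]; push_cast; omega)
    have hvl : v.toNat < g'.length := idx_lt g' v v.toNat hidx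
    rw [get_of_idx _ _ _ hidx, List.getElem?_eq_getElem hvl] at hget
    have := hrows' v.toNat (by omega)
    rw [List.getD_eq_getElem _ _ hvl] at this
    rw [← this]
    exact (Option.some.injEq _ _).mp hget |>.symm
  -- reach set facts
  have hRb : ∀ v ∈ reachSet sales links, 1 ≤ v ∧ v ≤ (sales.length : Int) := by
    intro v hv
    rcases reachL_mem sales.length links (links.length + 1) [1] v hv with h1 | ⟨l, hl, i, hr, hiR, hc⟩
    · obtain rfl : v = 1 := by simpa using h1
      exact ⟨le_refl _, by exact_mod_cast hn⟩
    · have := hreach l hl (by rw [hr]; simpa [reachSet] using hiR)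
      rw [hc] at this
      exact ⟨by omega, this.2⟩
  have hR1 : (1 : Int) ∈ reachSet sales links :=
    (reachL_prefix sales.length links (links.length + 1) [1]).subset (by simp)
  refine ⟨g', by rw [buildAdj]; exact hfold, rfl, hn, hlen, hR1, ?_, hRb, ?_, ?_⟩
  · -- readability of rows 1..n
    intro v cs h1 h2 hget c hc
    have hcs := hrow_get v cs (by omega) (by omega) hget
    rw [hcs] at hc
    obtain ⟨l, hl, hr, hcv⟩ := (rowOf_mem _ _ _ _).mp hc
    have := (hsafe l hl).2.2
    rw [hr] at this
    simp only [Option.getD_some] at this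
    have hb := this (by omega) (by omega)
    rw [hcv] at hb
    exact hb
  · -- reach rows: children in R with valid ids
    intro v hv cs hget c hc
    obtain ⟨hv1, hvn⟩ := hRb v hv
    have hcs := hrow_get v cs (by omega) (by omega) hget
    rw [hcs] at hc
    obtain ⟨l, hl, hr, hcv⟩ := (rowOf_mem _ _ _ _).mp hc
    have hvI : ((v.toNat : Nat) : Int) = v := by omega
    have hcR : l.getD 1 0 ∈ reachSet sales links :=
      pass_stable_closed sales.length links (reachSet sales links) hstab l hl v.toNat hr
        (by rw [hvI]; exact hv)
    have hb := hreach l hl (by rw [hr]; simp only [Option.getD_some]; rw [hvI]; exact hv)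
    rw [hcv] at hcR hb
    exact ⟨hcR, hb.1, hb.2⟩
  · -- at most one supervisor per reached employee
    intro v w hvR hwR cs cs' c hgv hgw hcv hcw
    obtain ⟨hv1, hvn⟩ := hRb v hvR
    obtain ⟨hw1, hwn⟩ := hRb w hwR
    have hcsv := hrow_get v cs (by omega) (by omega) hgv
    have hcsw := hrow_get w cs' (by omega) (by omega) hgw
    rw [hcsv] at hcv
    rw [hcsw] at hcw
    obtain ⟨l, hl, hr, hcvv⟩ := (rowOf_mem _ _ _ _).mp hcv
    obtain ⟨l', hl', hr', hcvw⟩ := (rowOf_mem _ _ _ _).mp hcw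
    have hvI : ((v.toNat : Nat) : Int) = v := by omega
    have hwI : ((w.toNat : Nat) : Int) = w := by omega
    set U := links.filterMap (fun l =>
      match linkRow sales.length l with
      | some i => if (i : Int) ∈ reachSet sales links then some (i, l.getD 1 0) else none
      | none => none) with hUdef
    have hmemU : ∀ (l0 : List Int), l0 ∈ links → ∀ (i : Nat),
        linkRow sales.length l0 = some i → ((i : Nat) : Int) ∈ reachSet sales links →
        (i, l0.getD 1 0) ∈ U := by
      intro l0 hl0 i hri hiR
      rw [hUdef]
      refine List.mem_filterMap.mpr ⟨l0, hl0, ?_⟩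
      rw [hri]
      simp only [if_pos hiR]
    have hmv : (v.toNat, l.getD 1 0) ∈ U := hmemU l hl v.toNat hr (by rw [hvI]; exact hvR)
    have hmw : (w.toNat, l'.getD 1 0) ∈ U := hmemU l' hl' w.toNat hr' (by rw [hwI]; exact hwR)
    have hsym : Symmetric (fun (a b : Nat × Int) => a.2 = b.2 → a.1 = b.1) := by
      intro a b hab hba
      exact (hab hba.symm).symm
    have heq2 : l.getD 1 0 = l'.getD 1 0 := by rw [hcvv, hcvw]
    by_cases hvw : (v.toNat, l.getD 1 0) = (w.toNat, l'.getD 1 0)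
    · have : v.toNat = w.toNat := (Prod.mk.injEq _ _ _ _).mp hvw |>.1
      omega
    · have := List.Pairwise.forall hsym hpair hmv hmw hvw heq2
      simp only at this
      omega

-- ===== VERDICT (by name: the statement is the Claim_ definition above) =====
theorem solution_spec : Claim_equal_solution := by
  unfold Claim_equal_solution
  intro sales links _ hpre
  unfold Spec_solution
  obtain ⟨children, hba, hg⟩ := pre_ctx sales links hpre
  have hroot : RPath children [1] := by rw [RPath]
  obtain ⟨p, hFp⟩ := term_F sales children (reachSet sales links) sales.length hg
    sales.length 1 [] hroot (by simp) (by simp)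
  have hFp1 : Fspec sales children (sales.length + 1) 1 = some p :=
    F_mono sales children sales.length 1 p hFp
  have hcl : (List.replicate (sales.length + 1) ((0 : Int), (0 : Int))).length =
      children.length := by simp [hg.2.2.1]
  obtain ⟨count', hrun, _, hread⟩ :=
    dfsA_of_F sales children (sales.length + 1)
      (List.replicate (sales.length + 1) ((0 : Int), (0 : Int))) 1 p hcl hFp1
  obtain ⟨keep, skip, hit, hkl, hsl, hq⟩ :=
    pass_iter sales children (reachSet sales links) sales.length hg sales.length
  have hrounds := roundsB_eq sales children (reachSet sales links) sales.length hg sales.length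
    (List.replicate (sales.length + 1) 0, List.replicate (sales.length + 1) 0)
    (by simp) (by simp)
  rw [hit] at hrounds
  obtain ⟨hk1, hs1⟩ := hq 1 p hg.2.2.2.1 hFp
  rw [solution, solution_alt]
  simp only [hba, hrun, hread, hrounds, hk1, hs1]
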